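-- pv_equiv track=rewrite | github.com/zena-dual/pdca-cycle | pdca_cycle.py | make_pdca_base
-- ===== SOURCE A (Python) =====
-- def make_pdca_base(side_length):
--     """
--     PDCAを回すための土台作り
--     """
--
--     bases = []
--     for i in range(side_length):
--         if i == 0:
--             l = [str(x) for x in range(side_length)]
--             base = '{0[' + ']}{0['.join(l) + ']}'
--         elif i == side_length - 1:
--             l = [str((side_length-1)*3 - x) for x in range(side_length)]
--             base = '{0[' + ']}{0['.join(l) + ']}'
--         else:
--             base = '{0[' + str((side_length-1)*4-i) + ']}' \
--                    + '{1}' * (side_length-2) \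
--                    + '{0[' + str((side_length-1)+i) + ']}'
--
--         bases.append(base)
--
--     return bases
-- ===== SOURCE B (Python) =====
-- def make_pdca_base(side_length):
--     """
--     PDCAを回すための土台作り
--     """
--     n = side_length
--     if n <= 0:
--         return []
--     # Build the clockwise perimeter ring of templates once, then slice it
--     # into the four sides and assemble the rows from those side lists.
--     ring_len = 1 if n == 1 else 4 * (n - 1)
--     ring = ['{0[' + str(k) + ']}' for k in range(ring_len)]
--     top = ring[0:n]                                   # top row, left -> right
--     right = ring[n - 1:2 * n - 1]                     # right column, top -> bottom
--     bottom = ring[2 * (n - 1):3 * (n - 1) + 1][::-1]  # bottom row, left -> right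
--     left = (ring[3 * (n - 1):] + ring[0:1])[::-1]     # left column, top -> bottom
--     rows = [''.join(top)]
--     for lt, rt in zip(left[1:n - 1], right[1:n - 1]):
--         rows.append(lt + '{1}' * (n - 2) + rt)
--     if n >= 2:
--         rows.append(''.join(bottom))
--     return rows
-- ===== Notes on version B (the rewrite author's own statement) =====
-- stated objective: alternative
-- what changed: B first materialises the clockwise perimeter ring of templates as one list, slices it into the four sides (reversing bottom and left), and assembles the rows by joining the top/bottom side lists and zipping the left/right columns for the middle rows, instead of A's per-row branches each computing border indices arithmetically.
import Mathlib
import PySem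

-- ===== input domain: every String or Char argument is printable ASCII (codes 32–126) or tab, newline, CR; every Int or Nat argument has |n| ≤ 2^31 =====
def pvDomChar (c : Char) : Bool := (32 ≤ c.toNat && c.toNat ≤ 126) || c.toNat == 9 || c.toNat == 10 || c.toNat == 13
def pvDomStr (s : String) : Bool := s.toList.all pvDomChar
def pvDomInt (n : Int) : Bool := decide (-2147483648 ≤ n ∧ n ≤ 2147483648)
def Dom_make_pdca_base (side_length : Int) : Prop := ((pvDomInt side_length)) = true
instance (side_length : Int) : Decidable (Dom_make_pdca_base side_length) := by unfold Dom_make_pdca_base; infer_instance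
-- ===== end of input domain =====

-- B builds the clockwise perimeter ring of templates once, slices it into the four
-- sides and assembles rows from the side lists, instead of A's per-row index
-- arithmetic ('alternative').

-- ===== PORT A =====
-- row for i == 0 / i == side_length-1: '{0[' + ']}{0['.join(l) + ']}'
def pvJoinedRow (l : List (List Char)) : List Char :=
  "{0[".toList ++ PySem.Chars.join "]}{0[".toList l ++ "]}".toList

def make_pdca_base (side_length : Int) : List String :=
  (PySem.List.pyRange 0 side_length 1).foldl (fun bases i =>
    let base : List Char :=
      if i == 0 then
        pvJoinedRow ((PySem.List.pyRange 0 side_length 1).map (fun x => PySem.Int.toChars x))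
      else if i == side_length - 1 then
        pvJoinedRow ((PySem.List.pyRange 0 side_length 1).map
          (fun x => PySem.Int.toChars ((side_length - 1) * 3 - x)))
      else
        -- '{1}' * (side_length-2): Python string repetition; .toNat clamps a negative
        -- count to 0 exactly as Python's `str * k` gives '' for k ≤ 0
        "{0[".toList ++ PySem.Int.toChars ((side_length - 1) * 4 - i) ++ "]}".toList
          ++ (List.replicate (side_length - 2).toNat "{1}".toList).flatten
          ++ "{0[".toList ++ PySem.Int.toChars ((side_length - 1) + i) ++ "]}".toList
    bases ++ [String.ofList base]) []

-- ===== PORT B =====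
def make_pdca_base_alt (side_length : Int) : List String :=
  let n := side_length
  if n ≤ 0 then []
  else
    let ring_len : Int := if n == 1 then 1 else 4 * (n - 1)
    let ring : List (List Char) :=
      (PySem.List.pyRange 0 ring_len 1).map
        (fun k => "{0[".toList ++ PySem.Int.toChars k ++ "]}".toList)
    let top := PySem.List.slice ring (some 0) (some n)
    let right := PySem.List.slice ring (some (n - 1)) (some (2 * n - 1))
    -- [::-1] ported as .reverse (exact: PySem.List.slice?_none_none_neg_one)
    let bottom := (PySem.List.slice ring (some (2 * (n - 1))) (some (3 * (n - 1) + 1))).reverse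
    let left := (PySem.List.slice ring (some (3 * (n - 1))) none
                  ++ PySem.List.slice ring (some 0) (some 1)).reverse
    let rows := [String.ofList (PySem.Chars.join [] top)]
    let rows := ((PySem.List.slice left (some 1) (some (n - 1))).zip
                   (PySem.List.slice right (some 1) (some (n - 1)))).foldl
      (fun rows p => rows ++ [String.ofList
        (p.1 ++ (List.replicate (n - 2).toNat "{1}".toList).flatten ++ p.2)]) rows
    if 2 ≤ n then rows ++ [String.ofList (PySem.Chars.join [] bottom)] else rows

-- ===== PRECONDITION & SPEC =====
def Spec_make_pdca_base (side_length : Int) (out : List String) : Prop := out = make_pdca_base_alt side_length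
instance (side_length : Int) (out : List String) : Decidable (Spec_make_pdca_base side_length out) := by unfold Spec_make_pdca_base; infer_instance

-- ===== CLAIM (what is proved, stated in full; the proofs are below) =====
def Claim_equal_make_pdca_base : Prop := ∀ (side_length : Int), Dom_make_pdca_base side_length → Spec_make_pdca_base side_length (make_pdca_base side_length)

-- ===== LEMMAS AND PROOFS =====

-- the '{1}'*(n-2) filler of a middle row
def pvRep (n : Int) : List Char := (List.replicate (n - 2).toNat "{1}".toList).flatten

-- common normal form of both programs' output for n ≥ 2
def pvCanon (n : Int) : List String :=
  String.ofList (((List.range n.toNat).map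
      (fun (k : Nat) => "{0[".toList ++ PySem.Int.toChars (k : Int) ++ "]}".toList)).flatten)
  :: (List.range (n - 2).toNat).map (fun (k : Nat) => String.ofList
       ("{0[".toList ++ PySem.Int.toChars (4 * n - 5 - (k : Int)) ++ "]}".toList
        ++ pvRep n
        ++ ("{0[".toList ++ PySem.Int.toChars (n + (k : Int)) ++ "]}".toList)))
  ++ [String.ofList (((List.range n.toNat).map
      (fun (k : Nat) => "{0[".toList ++ PySem.Int.toChars (3 * n - 3 - (k : Int)) ++ "]}".toList)).flatten)]

-- ''.join on a list of cell strings is their concatenation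
theorem join_empty_sep (xs : List (List Char)) : PySem.Chars.join [] xs = xs.flatten := by
  induction xs with
  | nil => simp [PySem.Chars.join_nil]
  | cons p rest ih =>
      cases rest with
      | nil => rw [PySem.Chars.join_singleton]; simp
      | cons q rest' => rw [PySem.Chars.join_cons_cons]; simp_all

-- '{0[' + ']}{0['.join(map f l) + ']}'  =  concatenation of per-element templates
theorem joinedRow_eq_flatten (f : Int → List Char) (l : List Int) (hl : l ≠ []) :
    pvJoinedRow (l.map f) =
      (l.map (fun x => "{0[".toList ++ f x ++ "]}".toList)).flatten := by
  induction l with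
  | nil => simp at hl
  | cons a rest ih =>
      cases rest with
      | nil =>
          unfold pvJoinedRow
          rw [List.map_cons, List.map_nil, PySem.Chars.join_singleton]
          simp
      | cons b rest' =>
          have hsep : "]}{0[".toList = "]}".toList ++ "{0[".toList := rfl
          simp only [List.map_cons] at ih ⊢
          unfold pvJoinedRow at ih ⊢
          rw [PySem.Chars.join_cons_cons, hsep, List.flatten_cons, ← ih (by simp)]
          simp [List.append_assoc]

theorem pyRange_take (a b : Int) (k : Nat) (h : a + k ≤ b) :
    (PySem.List.pyRange a b 1).take k = PySem.List.pyRange a (a + k) 1 := by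
  rw [PySem.List.pyRange_one_append a (a + k) b (by omega) h]
  exact List.take_left' (by rw [PySem.List.length_pyRange_one]; omega)

theorem pyRange_drop (a b : Int) (k : Nat) (h : a + k ≤ b) :
    (PySem.List.pyRange a b 1).drop k = PySem.List.pyRange (a + k) b 1 := by
  rw [PySem.List.pyRange_one_append a (a + k) b (by omega) h]
  exact List.drop_left' (by rw [PySem.List.length_pyRange_one]; omega)

theorem map_pyRange_zero_eq {α : Type} (f : Int → α) (n : Int) :
    (PySem.List.pyRange 0 n 1).map f = (List.range n.toNat).map (fun (k : Nat) => f (k : Int)) := by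
  rw [PySem.List.pyRange_one, List.map_map, Int.sub_zero]
  apply List.map_congr_left
  intro k _
  simp

theorem map_pyRange_eq {α : Type} (f : Int → α) (a b : Int) :
    (PySem.List.pyRange a b 1).map f = (List.range (b - a).toNat).map (fun (k : Nat) => f (a + (k : Int))) := by
  rw [PySem.List.pyRange_one, List.map_map]
  apply List.map_congr_left
  intro k _
  simp

theorem A_norm (n : Int) (hn : 2 ≤ n) : make_pdca_base n = pvCanon n := by
  unfold make_pdca_base
  rw [PySem.List.foldl_append_singleton_eq_map]
  simp only [List.nil_append]
  have hsplit : PySem.List.pyRange 0 n 1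
      = [0] ++ PySem.List.pyRange 1 (n - 1) 1 ++ [n - 1] := by
    rw [PySem.List.pyRange_one_append 0 (n - 1) n (by omega) (by omega),
        PySem.List.pyRange_one_cons (by omega)]
    have h2 : PySem.List.pyRange (n - 1) n 1 = [n - 1] := by
      have h3 := PySem.List.pyRange_one_singleton (n - 1)
      rwa [show n - 1 + 1 = n from by ring] at h3
    rw [h2]
    rfl
  refine Eq.trans (congrArg _ hsplit) ?_
  simp only [List.map_append, List.map_cons, List.map_nil]
  rw [if_pos (show ((0:Int) == 0) = true from by decide)]
  rw [if_neg (show ¬ ((n - 1 : Int) == 0) = true from by simp; omega),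
      if_pos (show ((n - 1 : Int) == n - 1) = true from by simp)]
  have hne : PySem.List.pyRange 0 n 1 ≠ [] := by
    rw [PySem.List.pyRange_one_cons (by omega)]; simp
  rw [joinedRow_eq_flatten _ _ hne, joinedRow_eq_flatten _ _ hne]
  rw [map_pyRange_zero_eq, map_pyRange_zero_eq, map_pyRange_eq,
      show (n - 1 - 1 : Int) = n - 2 from by ring]
  unfold pvCanon pvRep
  simp only [List.singleton_append]
  congr 1
  congr 1
  · -- middle rows
    apply List.map_congr_left
    intro k hk
    rw [List.mem_range] at hk
    show String.ofList _ = _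
    rw [if_neg (show ¬ ((1 + (k:Int)) == 0) = true from by simp; omega),
        if_neg (show ¬ ((1 + (k:Int)) == n - 1) = true from by simp; omega)]
    rw [show (n - 1) * 4 - (1 + (k:Int)) = 4 * n - 5 - (k:Int) from by ring,
        show n - 1 + (1 + (k:Int)) = n + (k:Int) from by ring]
    simp only [List.append_assoc]
  · -- bottom row
    refine congrArg (fun l : List (List Char) => [String.ofList l.flatten]) ?_
    apply List.map_congr_left
    intro k _
    rw [show (n - 1) * 3 - (k:Int) = 3 * n - 3 - (k:Int) from by ring]

theorem slice_map_pyRange {α : Type} (f : Int → α) (s t a b : Int)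
    (h0 : 0 ≤ a) (hab : a ≤ b) (hs : s + b ≤ t) :
    PySem.List.slice ((PySem.List.pyRange s t 1).map f) (some a) (some b)
      = (PySem.List.pyRange (s + a) (s + b) 1).map f := by
  rw [PySem.List.slice_toNat _ h0 (by omega), ← List.map_drop, ← List.map_take,
      pyRange_drop s t a.toNat (by omega),
      show s + (a.toNat : Int) = s + a from by omega,
      pyRange_take (s + a) t (b.toNat - a.toNat) (by omega),
      show s + a + ((b.toNat - a.toNat : Nat) : Int) = s + b from by omega]

theorem reverse_map_pyRange {α : Type} (f : Int → α) (a b : Int) :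
    ((PySem.List.pyRange a b 1).map f).reverse
      = (List.range (b - a).toNat).map (fun (k : Nat) => f (b - 1 - k)) := by
  have h := PySem.List.pyRange_neg_one_eq_reverse (b - 1) (a - 1)
  rw [show a - 1 + 1 = a from by ring, show b - 1 + 1 = b from by ring] at h
  rw [← List.map_reverse, ← h, PySem.List.pyRange_neg_one,
      show b - 1 - (a - 1) = b - a from by ring, List.map_map]
  apply List.map_congr_left
  intro k _
  simp

theorem B_norm (n : Int) (hn : 2 ≤ n) : make_pdca_base_alt n = pvCanon n := by
  simp only [make_pdca_base_alt]
  rw [if_neg (show ¬ n ≤ 0 from by omega),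
      if_neg (show ¬ ((n == 1) = true) from by simp; omega),
      if_pos hn]
  rw [show (4:Int) * (n - 1) = 4 * n - 4 from by ring,
      show (3:Int) * (n - 1) + 1 = 3 * n - 2 from by ring,
      show (3:Int) * (n - 1) = 3 * n - 3 from by ring,
      show (2:Int) * (n - 1) = 2 * n - 2 from by ring]
  rw [slice_map_pyRange _ 0 (4 * n - 4) 0 n (by omega) (by omega) (by omega),
      slice_map_pyRange _ 0 (4 * n - 4) 0 1 (by omega) (by omega) (by omega),
      slice_map_pyRange _ 0 (4 * n - 4) (n - 1) (2 * n - 1) (by omega) (by omega) (by omega),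
      slice_map_pyRange _ 0 (4 * n - 4) (2 * n - 2) (3 * n - 2) (by omega) (by omega) (by omega)]
  simp only [zero_add]
  rw [show PySem.List.pyRange 0 1 1 = [(0 : Int)] from by decide]
  simp only [List.map_cons, List.map_nil]
  rw [PySem.List.slice_from _ (by omega : (0 : Int) ≤ 3 * n - 3),
      ← List.map_drop, pyRange_drop 0 (4 * n - 4) (3 * n - 3).toNat (by omega)]
  simp only [zero_add]
  rw [show (((3 * n - 3).toNat : Nat) : Int) = 3 * n - 3 from by omega]
  simp only [List.reverse_append, List.reverse_cons, List.reverse_nil, List.nil_append,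
             List.singleton_append]
  rw [reverse_map_pyRange _ (3 * n - 3) (4 * n - 4),
      show (4 * n - 4 : Int) - (3 * n - 3) = n - 1 from by ring,
      show (4 * n - 4 : Int) - 1 = 4 * n - 5 from by ring]
  rw [PySem.List.slice_toNat _ (by omega : (0 : Int) ≤ 1) (by omega : (0 : Int) ≤ n - 1),
      PySem.List.slice_toNat _ (by omega : (0 : Int) ≤ 1) (by omega : (0 : Int) ≤ n - 1)]
  simp only [Int.toNat_one]
  rw [show ((n - 1).toNat - 1 : Nat) = (n - 2).toNat from by omega]
  simp only [List.drop_one, List.tail_cons]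
  rw [PySem.List.pyRange_one_cons (show (n - 1 : Int) < 2 * n - 1 from by omega)]
  simp only [List.map_cons, List.tail_cons]
  rw [show (n - 1 + 1 : Int) = n from by ring]
  rw [← List.map_take, ← List.map_take, List.take_range,
      show min ((n - 2).toNat) ((n - 1).toNat) = (n - 2).toNat from by omega,
      pyRange_take n (2 * n - 1) (n - 2).toNat (by omega),
      show n + (((n - 2).toNat : Nat) : Int) = 2 * n - 2 from by omega,
      map_pyRange_eq _ n (2 * n - 2),
      show (2 * n - 2 : Int) - n = n - 2 from by ring]
  rw [List.zip_map', PySem.List.foldl_append_singleton_eq_map, List.map_map,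
      reverse_map_pyRange _ (2 * n - 2) (3 * n - 2),
      show (3 * n - 2 : Int) - (2 * n - 2) = n from by ring,
      show (3 * n - 2 : Int) - 1 = 3 * n - 3 from by ring,
      join_empty_sep, join_empty_sep, map_pyRange_zero_eq]
  unfold pvCanon pvRep
  simp only [List.singleton_append]
  rfl

-- ===== VERDICT (by name: the statement is the Claim_ definition above) =====
theorem make_pdca_base_spec : Claim_equal_make_pdca_base := by
  intro n _
  unfold Spec_make_pdca_base
  by_cases h0 : n ≤ 0
  · unfold make_pdca_base make_pdca_base_alt
    rw [PySem.List.pyRange_one_eq_nil (by omega), if_pos h0]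
    rfl
  · by_cases h1 : n = 1
    · subst h1; decide
    · rw [A_norm n (by omega), B_norm n (by omega)]
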